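-- pv_equiv track=rewrite | github.com/IVITRA/kldlkfjkqdf | asm_project/training/self_learning/source_validator.py | _is_social_media
-- ===== SOURCE A (Python) =====
-- def _is_social_media(domain: str) -> bool:
--     """Check if domain is a social media platform"""
--     social_media_domains = {
--         'facebook.com', 'twitter.com', 'x.com', 'instagram.com',
--         'tiktok.com', 'reddit.com', 'tumblr.com', 'pinterest.com',
--         'snapchat.com', 'linkedin.com'
--     }
--
--     return domain in social_media_domains or any(
--         domain.endswith('.' + sm) for sm in social_media_domains
--     )
-- ===== SOURCE B (Python) =====
-- def _is_social_media(domain: str) -> bool: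
--     """Check if domain is a social media platform"""
--     social_media_domains = {
--         'facebook.com', 'twitter.com', 'x.com', 'instagram.com',
--         'tiktok.com', 'reddit.com', 'tumblr.com', 'pinterest.com',
--         'snapchat.com', 'linkedin.com'
--     }
--     if domain in social_media_domains:
--         return True
--     for i, ch in enumerate(domain):
--         if ch == '.' and domain[i + 1:] in social_media_domains:
--             return True
--     return False
-- ===== Notes on version B (the rewrite author's own statement) =====
-- stated objective: alternative
-- what changed: B derives candidate suffixes from the input (the domain itself plus the tail after each dot) and tests each for set membership, instead of scanning the whole social-media set and doing an endswith test per entry.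
import Mathlib
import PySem

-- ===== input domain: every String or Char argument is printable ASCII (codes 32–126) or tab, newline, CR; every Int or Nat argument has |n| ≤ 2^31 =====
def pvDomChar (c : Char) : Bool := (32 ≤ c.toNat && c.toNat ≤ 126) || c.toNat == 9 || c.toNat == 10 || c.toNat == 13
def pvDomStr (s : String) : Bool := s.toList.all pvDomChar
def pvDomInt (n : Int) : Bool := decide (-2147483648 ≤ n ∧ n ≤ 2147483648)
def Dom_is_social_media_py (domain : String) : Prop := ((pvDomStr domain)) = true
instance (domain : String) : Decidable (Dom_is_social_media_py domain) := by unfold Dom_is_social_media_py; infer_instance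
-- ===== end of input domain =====

-- B tests input-derived candidate suffixes for set membership instead of scanning the set with endswith (alternative decomposition, same cost class).

-- ===== PORT A =====
-- the set literal of social-media domains (all elements distinct, insertion order as written)
def smDomains : List String :=
  ["facebook.com", "twitter.com", "x.com", "instagram.com",
   "tiktok.com", "reddit.com", "tumblr.com", "pinterest.com",
   "snapchat.com", "linkedin.com"]

def is_social_media_py (domain : String) : Bool :=
  smDomains.contains domain ||
    smDomains.any (fun sm => PySem.Str.endswith domain ("." ++ sm))

-- ===== PORT B =====
def is_social_media_py_alt (domain : String) : Bool :=
  if smDomains.contains domain then true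
  else
    (PySem.List.enumerate domain.toList).any (fun p =>
      p.2 == '.' && smDomains.contains (PySem.Str.slice domain (some (p.1 + 1)) none))

-- ===== PRECONDITION & SPEC =====
def Spec_is_social_media_py (domain : String) (out : Bool) : Prop := out = is_social_media_py_alt domain
instance (domain : String) (out : Bool) : Decidable (Spec_is_social_media_py domain out) := by unfold Spec_is_social_media_py; infer_instance

-- ===== CLAIM (what is proved, stated in full; the proofs are below) =====
def Claim_equal_is_social_media_py : Prop := ∀ (domain : String), Dom_is_social_media_py domain → Spec_is_social_media_py domain (is_social_media_py domain)

-- ===== LEMMAS AND PROOFS =====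

-- '.'-prefixed suffix ⟷ a dot position whose tail is cs
theorem dot_suffix_iff (l cs : List Char) :
    ('.' :: cs) <:+ l ↔ ∃ k, ∃ h : k < l.length, l[k] = '.' ∧ l.drop (k + 1) = cs := by
  constructor
  · rintro ⟨t, ht⟩
    subst ht
    refine ⟨t.length, by simp, ?_, ?_⟩
    · simp
    · rw [List.drop_append]
      simp
  · rintro ⟨k, hk, hdot, hdrop⟩
    refine ⟨l.take k, ?_⟩
    have h1 : l.drop k = l[k] :: l.drop (k + 1) := List.drop_eq_getElem_cons hk
    rw [hdot, hdrop] at h1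
    rw [← h1, List.take_append_drop]

theorem slice_succ_toList (domain : String) (k : Nat) :
    (PySem.Str.slice domain (some ((k : Int) + 1)) none).toList = domain.toList.drop (k + 1) := by
  have h : (PySem.Str.slice domain (some ((k : Int) + 1)) none).toList
      = PySem.List.slice domain.toList (some ((k : Int) + 1)) none := by simp
  rw [h, show ((k : Int) + 1) = ((k + 1 : Nat) : Int) by push_cast; ring,
    PySem.List.slice_from_natCast]

theorem is_social_media_py_spec : Claim_equal_is_social_media_py := by
  intro domain _
  unfold Spec_is_social_media_py is_social_media_py is_social_media_py_alt
  by_cases h : smDomains.contains domain = true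
  · have hm : domain ∈ smDomains := by simpa using h
    simp [hm]
  · rw [Bool.not_eq_true] at h
    rw [h, if_neg (by simp)]
    simp only [Bool.false_or]
    rw [Bool.eq_iff_iff, List.any_eq_true, List.any_eq_true]
    constructor
    · rintro ⟨sm, hsm, hend⟩
      rw [PySem.Str.endswith_eq, PySem.Chars.endswith_iff] at hend
      have hend' : ('.' :: sm.toList) <:+ domain.toList := by
        simpa using hend
      rw [dot_suffix_iff] at hend'
      obtain ⟨k, hk, hdot, hdrop⟩ := hend'
      refine ⟨(0 + (k : Int), domain.toList[k]), ?_, ?_⟩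
      · rw [PySem.List.mem_enumerate_iff]
        exact ⟨k, hk, rfl⟩
      · have hsl : PySem.Str.slice domain (some ((k : Int) + 1)) none = sm := by
          apply String.toList_injective
          rw [slice_succ_toList, hdrop]
        simp only [Int.zero_add, hdot, hsl]
        simp [hsm]
    · rintro ⟨⟨i, c⟩, hp, hg⟩
      rw [PySem.List.mem_enumerate_iff] at hp
      obtain ⟨k, hk, hpk⟩ := hp
      obtain ⟨h1, h2⟩ := Prod.mk.injEq .. ▸ hpk
      subst h1; subst h2
      simp only [Int.zero_add, Bool.and_eq_true, beq_iff_eq] at hg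
      obtain ⟨hdot, hmem⟩ := hg
      refine ⟨PySem.Str.slice domain (some ((k : Int) + 1)) none, by simpa using hmem, ?_⟩
      rw [PySem.Str.endswith_eq, PySem.Chars.endswith_iff]
      have heq : ("." ++ PySem.Str.slice domain (some ((k : Int) + 1)) none).toList
          = '.' :: domain.toList.drop (k + 1) := by
        rw [String.toList_append, slice_succ_toList]; rfl
      rw [heq, dot_suffix_iff]
      exact ⟨k, hk, hdot, rfl⟩
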